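-- pv_equiv track=rewrite | github.com/liviuepure/PQC-Standards-Implementation | python/hqc/rm.py | rm_encode_single
-- ===== SOURCE A (Python) =====
-- def rm_encode_single(msg_byte: int) -> int:
--     """Encode a single byte using RM(1,7) into a 128-bit integer.
--
--     msg_byte has 8 bits: b0 is the constant term, b1..b7 are the linear terms.
--     The codeword c[j] for j in [0,128) is:
--         c[j] = b0 XOR (b1 & j_0) XOR (b2 & j_1) XOR ... XOR (b7 & j_6)
--     where j_i is bit i of j.
--     """
--     result = 0
--     b0 = (msg_byte >> 0) & 1
--     for j in range(128):
--         bit = b0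
--         for i in range(7):
--             if (msg_byte >> (i + 1)) & 1:
--                 bit ^= (j >> i) & 1
--         if bit:
--             result |= (1 << j)
--     return result
-- ===== SOURCE B (Python) =====
-- # RM(1,7) encode: XOR of precomputed generator rows, one per set message bit,
-- # instead of computing each of the 128 codeword bits separately.
--
-- _ROWS = (
--     0xffffffffffffffffffffffffffffffff,  # constant term b0: all-ones row
--     0xaaaaaaaaaaaaaaaaaaaaaaaaaaaaaaaa,  # b1: bit j set iff (j >> 0) & 1
--     0xcccccccccccccccccccccccccccccccc,  # b2: bit j set iff (j >> 1) & 1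
--     0xf0f0f0f0f0f0f0f0f0f0f0f0f0f0f0f0,  # b3
--     0xff00ff00ff00ff00ff00ff00ff00ff00,  # b4
--     0xffff0000ffff0000ffff0000ffff0000,  # b5
--     0xffffffff00000000ffffffff00000000,  # b6
--     0xffffffffffffffff0000000000000000,  # b7
-- )
--
--
-- def rm_encode_single(msg_byte: int) -> int:
--     result = 0
--     for i, row in enumerate(_ROWS):
--         if (msg_byte >> i) & 1:
--             result ^= row
--     return result
-- ===== Notes on version B (the rewrite author's own statement) =====
-- stated objective: faster
-- what changed: A computes each codeword bit separately with a nested loop over all output positions and all linear message bits; B instead XOR-accumulates eight precomputed wide generator rows, one conditional XOR per message bit.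
import Mathlib
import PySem

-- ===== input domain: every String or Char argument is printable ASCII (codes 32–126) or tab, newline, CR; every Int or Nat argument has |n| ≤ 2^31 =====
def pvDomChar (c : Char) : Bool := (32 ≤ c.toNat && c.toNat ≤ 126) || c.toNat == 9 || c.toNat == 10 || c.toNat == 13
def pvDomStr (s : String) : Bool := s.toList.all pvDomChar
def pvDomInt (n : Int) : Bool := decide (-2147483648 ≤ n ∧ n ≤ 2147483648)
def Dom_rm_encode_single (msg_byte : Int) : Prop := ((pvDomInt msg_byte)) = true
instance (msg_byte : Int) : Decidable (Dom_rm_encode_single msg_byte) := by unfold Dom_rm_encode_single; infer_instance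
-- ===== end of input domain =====

-- B replaces A's per-output-bit double loop by a single XOR accumulation of eight
-- precomputed wide generator rows, one conditional XOR per message bit.

-- ===== PORT A =====
-- literal transliteration of Source A: for j in range(128) with an inner for i in range(7).
-- Every shift count is a range value, hence nonnegative, so 'Int.shiftRight _ count.toNat' /
-- 'Int.shiftLeft _ count.toNat' are exactly Python's '>>' / '<<' here (core Lean '>>>'/'<<<' with a Nat count).
def rm_encode_single (msg_byte : Int) : Int :=
  let b0 : Int := PySem.Int.band (Int.shiftRight msg_byte 0) 1
  (PySem.List.pyRange 0 128 1).foldl (fun result j =>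
    let bit := (PySem.List.pyRange 0 7 1).foldl (fun bit i =>
      if PySem.Int.band (Int.shiftRight msg_byte (i + 1).toNat) 1 ≠ 0 then
        PySem.Int.bxor bit (PySem.Int.band (Int.shiftRight j i.toNat) 1)
      else bit) b0
    if bit ≠ 0 then PySem.Int.bor result (Int.shiftLeft 1 j.toNat) else result) 0

-- ===== PORT B =====
-- the precomputed generator rows _ROWS of Source B
def pvRows : List Int :=
  [0xffffffffffffffffffffffffffffffff,
   0xaaaaaaaaaaaaaaaaaaaaaaaaaaaaaaaa,
   0xcccccccccccccccccccccccccccccccc,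
   0xf0f0f0f0f0f0f0f0f0f0f0f0f0f0f0f0,
   0xff00ff00ff00ff00ff00ff00ff00ff00,
   0xffff0000ffff0000ffff0000ffff0000,
   0xffffffff00000000ffffffff00000000,
   0xffffffffffffffff0000000000000000]

-- literal transliteration of Source B: for i, row in enumerate(_ROWS): if (msg_byte >> i) & 1: result ^= row
-- (the enumerate index i is nonnegative, so 'Int.shiftRight _ i.toNat' is exactly Python's '>>')
def rm_encode_single_alt (msg_byte : Int) : Int :=
  (PySem.List.enumerate pvRows).foldl (fun result p =>
    if PySem.Int.band (Int.shiftRight msg_byte p.1.toNat) 1 ≠ 0 then PySem.Int.bxor result p.2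
    else result) 0


-- ===== PRECONDITION & SPEC =====
def Spec_rm_encode_single (msg_byte : Int) (out : Int) : Prop := out = rm_encode_single_alt msg_byte
instance (msg_byte : Int) (out : Int) : Decidable (Spec_rm_encode_single msg_byte out) := by unfold Spec_rm_encode_single; infer_instance

-- ===== CLAIM (what is proved, stated in full; the proofs are below) =====
def Claim_equal_rm_encode_single : Prop := ∀ (msg_byte : Int), Dom_rm_encode_single msg_byte → Spec_rm_encode_single msg_byte (rm_encode_single msg_byte)

-- ===== LEMMAS AND PROOFS =====

-- Bit k (k < 8) of an integer equals bit k of its residue mod 256.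
theorem pv_bit_mod (m : Int) (k : Nat) (hk : k < 8) :
    PySem.Int.band (Int.shiftRight m k) 1 = PySem.Int.band (Int.shiftRight (m % 256) k) 1 := by
  have e1 : Int.shiftRight m k = m / 2 ^ k := Int.shiftRight_eq_div_pow m k
  have e2 : Int.shiftRight (m % 256) k = (m % 256) / 2 ^ k := Int.shiftRight_eq_div_pow _ k
  rw [PySem.Int.band_one, PySem.Int.band_one,
      PySem.Int.mod_eq_emod_of_pos (by norm_num),
      PySem.Int.mod_eq_emod_of_pos (by norm_num), e1, e2]
  interval_cases k <;> omega

-- A reads only bits 0..7 of msg_byte.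
theorem pvA_mod (m : Int) : rm_encode_single m = rm_encode_single (m % 256) := by
  unfold rm_encode_single
  rw [pv_bit_mod m 0 (by norm_num)]
  dsimp only
  apply PySem.List.foldl_congr_mem
  intro result j _
  have h : ((PySem.List.pyRange 0 7 1).foldl (fun bit i =>
        if PySem.Int.band (Int.shiftRight m (i + 1).toNat) 1 ≠ 0 then
          PySem.Int.bxor bit (PySem.Int.band (Int.shiftRight j i.toNat) 1)
        else bit) (PySem.Int.band (Int.shiftRight (m % 256) 0) 1))
      = ((PySem.List.pyRange 0 7 1).foldl (fun bit i =>
        if PySem.Int.band (Int.shiftRight (m % 256) (i + 1).toNat) 1 ≠ 0 then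
          PySem.Int.bxor bit (PySem.Int.band (Int.shiftRight j i.toNat) 1)
        else bit) (PySem.Int.band (Int.shiftRight (m % 256) 0) 1)) := by
    apply PySem.List.foldl_congr_mem
    intro bit i hi
    rw [PySem.List.mem_pyRange_one] at hi
    rw [pv_bit_mod m (i + 1).toNat (by omega)]
  rw [h]

-- B reads only bits 0..7 of msg_byte.
theorem pvB_mod (m : Int) : rm_encode_single_alt m = rm_encode_single_alt (m % 256) := by
  unfold rm_encode_single_alt
  apply PySem.List.foldl_congr_mem
  intro result p hp
  rw [PySem.List.mem_enumerate_iff] at hp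
  obtain ⟨k, hk, rfl⟩ := hp
  have hk8 : k < 8 := by simpa [pvRows] using hk
  have hidx : ((0 : Int) + (k : Int)).toNat = k := by omega
  rw [hidx, pv_bit_mod m k hk8]

-- extract one instance from a kernel-checked chunk of the 256-entry table
theorem pv_of_all {L : List Int}
    (h : L.all (fun r => rm_encode_single r == rm_encode_single_alt r) = true)
    {x : Int} (hx : x ∈ L) : rm_encode_single x = rm_encode_single_alt x :=
  beq_iff_eq.mp (List.all_eq_true.mp h x hx)

-- A = B on the 256 residues mod 256, checked by the kernel in chunks
set_option maxRecDepth 100000 in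
theorem pv_chunk0 :
    ((List.range 8).map (fun t => ((8 * 0 + t : Nat) : Int))).all
      (fun r => rm_encode_single r == rm_encode_single_alt r) = true := by
  decide

set_option maxRecDepth 100000 in
theorem pv_chunk1 :
    ((List.range 8).map (fun t => ((8 * 1 + t : Nat) : Int))).all
      (fun r => rm_encode_single r == rm_encode_single_alt r) = true := by
  decide

set_option maxRecDepth 100000 in
theorem pv_chunk2 :
    ((List.range 8).map (fun t => ((8 * 2 + t : Nat) : Int))).all
      (fun r => rm_encode_single r == rm_encode_single_alt r) = true := by
  decide

set_option maxRecDepth 100000 in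
theorem pv_chunk3 :
    ((List.range 8).map (fun t => ((8 * 3 + t : Nat) : Int))).all
      (fun r => rm_encode_single r == rm_encode_single_alt r) = true := by
  decide

set_option maxRecDepth 100000 in
theorem pv_chunk4 :
    ((List.range 8).map (fun t => ((8 * 4 + t : Nat) : Int))).all
      (fun r => rm_encode_single r == rm_encode_single_alt r) = true := by
  decide

set_option maxRecDepth 100000 in
theorem pv_chunk5 :
    ((List.range 8).map (fun t => ((8 * 5 + t : Nat) : Int))).all
      (fun r => rm_encode_single r == rm_encode_single_alt r) = true := by
  decide

set_option maxRecDepth 100000 in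
theorem pv_chunk6 :
    ((List.range 8).map (fun t => ((8 * 6 + t : Nat) : Int))).all
      (fun r => rm_encode_single r == rm_encode_single_alt r) = true := by
  decide

set_option maxRecDepth 100000 in
theorem pv_chunk7 :
    ((List.range 8).map (fun t => ((8 * 7 + t : Nat) : Int))).all
      (fun r => rm_encode_single r == rm_encode_single_alt r) = true := by
  decide

set_option maxRecDepth 100000 in
theorem pv_chunk8 :
    ((List.range 8).map (fun t => ((8 * 8 + t : Nat) : Int))).all
      (fun r => rm_encode_single r == rm_encode_single_alt r) = true := by
  decide

set_option maxRecDepth 100000 in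
theorem pv_chunk9 :
    ((List.range 8).map (fun t => ((8 * 9 + t : Nat) : Int))).all
      (fun r => rm_encode_single r == rm_encode_single_alt r) = true := by
  decide

set_option maxRecDepth 100000 in
theorem pv_chunk10 :
    ((List.range 8).map (fun t => ((8 * 10 + t : Nat) : Int))).all
      (fun r => rm_encode_single r == rm_encode_single_alt r) = true := by
  decide

set_option maxRecDepth 100000 in
theorem pv_chunk11 :
    ((List.range 8).map (fun t => ((8 * 11 + t : Nat) : Int))).all
      (fun r => rm_encode_single r == rm_encode_single_alt r) = true := by
  decide

set_option maxRecDepth 100000 in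
theorem pv_chunk12 :
    ((List.range 8).map (fun t => ((8 * 12 + t : Nat) : Int))).all
      (fun r => rm_encode_single r == rm_encode_single_alt r) = true := by
  decide

set_option maxRecDepth 100000 in
theorem pv_chunk13 :
    ((List.range 8).map (fun t => ((8 * 13 + t : Nat) : Int))).all
      (fun r => rm_encode_single r == rm_encode_single_alt r) = true := by
  decide

set_option maxRecDepth 100000 in
theorem pv_chunk14 :
    ((List.range 8).map (fun t => ((8 * 14 + t : Nat) : Int))).all
      (fun r => rm_encode_single r == rm_encode_single_alt r) = true := by
  decide

set_option maxRecDepth 100000 in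
theorem pv_chunk15 :
    ((List.range 8).map (fun t => ((8 * 15 + t : Nat) : Int))).all
      (fun r => rm_encode_single r == rm_encode_single_alt r) = true := by
  decide

set_option maxRecDepth 100000 in
theorem pv_chunk16 :
    ((List.range 8).map (fun t => ((8 * 16 + t : Nat) : Int))).all
      (fun r => rm_encode_single r == rm_encode_single_alt r) = true := by
  decide

set_option maxRecDepth 100000 in
theorem pv_chunk17 :
    ((List.range 8).map (fun t => ((8 * 17 + t : Nat) : Int))).all
      (fun r => rm_encode_single r == rm_encode_single_alt r) = true := by
  decide

set_option maxRecDepth 100000 in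
theorem pv_chunk18 :
    ((List.range 8).map (fun t => ((8 * 18 + t : Nat) : Int))).all
      (fun r => rm_encode_single r == rm_encode_single_alt r) = true := by
  decide

set_option maxRecDepth 100000 in
theorem pv_chunk19 :
    ((List.range 8).map (fun t => ((8 * 19 + t : Nat) : Int))).all
      (fun r => rm_encode_single r == rm_encode_single_alt r) = true := by
  decide

set_option maxRecDepth 100000 in
theorem pv_chunk20 :
    ((List.range 8).map (fun t => ((8 * 20 + t : Nat) : Int))).all
      (fun r => rm_encode_single r == rm_encode_single_alt r) = true := by
  decide

set_option maxRecDepth 100000 in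
theorem pv_chunk21 :
    ((List.range 8).map (fun t => ((8 * 21 + t : Nat) : Int))).all
      (fun r => rm_encode_single r == rm_encode_single_alt r) = true := by
  decide

set_option maxRecDepth 100000 in
theorem pv_chunk22 :
    ((List.range 8).map (fun t => ((8 * 22 + t : Nat) : Int))).all
      (fun r => rm_encode_single r == rm_encode_single_alt r) = true := by
  decide

set_option maxRecDepth 100000 in
theorem pv_chunk23 :
    ((List.range 8).map (fun t => ((8 * 23 + t : Nat) : Int))).all
      (fun r => rm_encode_single r == rm_encode_single_alt r) = true := by
  decide

set_option maxRecDepth 100000 in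
theorem pv_chunk24 :
    ((List.range 8).map (fun t => ((8 * 24 + t : Nat) : Int))).all
      (fun r => rm_encode_single r == rm_encode_single_alt r) = true := by
  decide

set_option maxRecDepth 100000 in
theorem pv_chunk25 :
    ((List.range 8).map (fun t => ((8 * 25 + t : Nat) : Int))).all
      (fun r => rm_encode_single r == rm_encode_single_alt r) = true := by
  decide

set_option maxRecDepth 100000 in
theorem pv_chunk26 :
    ((List.range 8).map (fun t => ((8 * 26 + t : Nat) : Int))).all
      (fun r => rm_encode_single r == rm_encode_single_alt r) = true := by
  decide

set_option maxRecDepth 100000 in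
theorem pv_chunk27 :
    ((List.range 8).map (fun t => ((8 * 27 + t : Nat) : Int))).all
      (fun r => rm_encode_single r == rm_encode_single_alt r) = true := by
  decide

set_option maxRecDepth 100000 in
theorem pv_chunk28 :
    ((List.range 8).map (fun t => ((8 * 28 + t : Nat) : Int))).all
      (fun r => rm_encode_single r == rm_encode_single_alt r) = true := by
  decide

set_option maxRecDepth 100000 in
theorem pv_chunk29 :
    ((List.range 8).map (fun t => ((8 * 29 + t : Nat) : Int))).all
      (fun r => rm_encode_single r == rm_encode_single_alt r) = true := by
  decide

set_option maxRecDepth 100000 in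
theorem pv_chunk30 :
    ((List.range 8).map (fun t => ((8 * 30 + t : Nat) : Int))).all
      (fun r => rm_encode_single r == rm_encode_single_alt r) = true := by
  decide

set_option maxRecDepth 100000 in
theorem pv_chunk31 :
    ((List.range 8).map (fun t => ((8 * 31 + t : Nat) : Int))).all
      (fun r => rm_encode_single r == rm_encode_single_alt r) = true := by
  decide

-- combine the chunks: A = B on every residue
set_option maxHeartbeats 4000000 in
theorem pv_all (r : Int) (h0 : 0 ≤ r) (h1 : r < 256) :
    rm_encode_single r = rm_encode_single_alt r := by
  obtain ⟨c, hc32, hceq⟩ : ∃ c, c < 32 ∧ r.toNat / 8 = c := ⟨_, by omega, rfl⟩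
  interval_cases c
  all_goals
    first
    | exact pv_of_all pv_chunk0 (List.mem_map.mpr ⟨r.toNat % 8, List.mem_range.mpr (by omega), by omega⟩)
    | exact pv_of_all pv_chunk1 (List.mem_map.mpr ⟨r.toNat % 8, List.mem_range.mpr (by omega), by omega⟩)
    | exact pv_of_all pv_chunk2 (List.mem_map.mpr ⟨r.toNat % 8, List.mem_range.mpr (by omega), by omega⟩)
    | exact pv_of_all pv_chunk3 (List.mem_map.mpr ⟨r.toNat % 8, List.mem_range.mpr (by omega), by omega⟩)
    | exact pv_of_all pv_chunk4 (List.mem_map.mpr ⟨r.toNat % 8, List.mem_range.mpr (by omega), by omega⟩)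
    | exact pv_of_all pv_chunk5 (List.mem_map.mpr ⟨r.toNat % 8, List.mem_range.mpr (by omega), by omega⟩)
    | exact pv_of_all pv_chunk6 (List.mem_map.mpr ⟨r.toNat % 8, List.mem_range.mpr (by omega), by omega⟩)
    | exact pv_of_all pv_chunk7 (List.mem_map.mpr ⟨r.toNat % 8, List.mem_range.mpr (by omega), by omega⟩)
    | exact pv_of_all pv_chunk8 (List.mem_map.mpr ⟨r.toNat % 8, List.mem_range.mpr (by omega), by omega⟩)
    | exact pv_of_all pv_chunk9 (List.mem_map.mpr ⟨r.toNat % 8, List.mem_range.mpr (by omega), by omega⟩)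
    | exact pv_of_all pv_chunk10 (List.mem_map.mpr ⟨r.toNat % 8, List.mem_range.mpr (by omega), by omega⟩)
    | exact pv_of_all pv_chunk11 (List.mem_map.mpr ⟨r.toNat % 8, List.mem_range.mpr (by omega), by omega⟩)
    | exact pv_of_all pv_chunk12 (List.mem_map.mpr ⟨r.toNat % 8, List.mem_range.mpr (by omega), by omega⟩)
    | exact pv_of_all pv_chunk13 (List.mem_map.mpr ⟨r.toNat % 8, List.mem_range.mpr (by omega), by omega⟩)
    | exact pv_of_all pv_chunk14 (List.mem_map.mpr ⟨r.toNat % 8, List.mem_range.mpr (by omega), by omega⟩)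
    | exact pv_of_all pv_chunk15 (List.mem_map.mpr ⟨r.toNat % 8, List.mem_range.mpr (by omega), by omega⟩)
    | exact pv_of_all pv_chunk16 (List.mem_map.mpr ⟨r.toNat % 8, List.mem_range.mpr (by omega), by omega⟩)
    | exact pv_of_all pv_chunk17 (List.mem_map.mpr ⟨r.toNat % 8, List.mem_range.mpr (by omega), by omega⟩)
    | exact pv_of_all pv_chunk18 (List.mem_map.mpr ⟨r.toNat % 8, List.mem_range.mpr (by omega), by omega⟩)
    | exact pv_of_all pv_chunk19 (List.mem_map.mpr ⟨r.toNat % 8, List.mem_range.mpr (by omega), by omega⟩)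
    | exact pv_of_all pv_chunk20 (List.mem_map.mpr ⟨r.toNat % 8, List.mem_range.mpr (by omega), by omega⟩)
    | exact pv_of_all pv_chunk21 (List.mem_map.mpr ⟨r.toNat % 8, List.mem_range.mpr (by omega), by omega⟩)
    | exact pv_of_all pv_chunk22 (List.mem_map.mpr ⟨r.toNat % 8, List.mem_range.mpr (by omega), by omega⟩)
    | exact pv_of_all pv_chunk23 (List.mem_map.mpr ⟨r.toNat % 8, List.mem_range.mpr (by omega), by omega⟩)
    | exact pv_of_all pv_chunk24 (List.mem_map.mpr ⟨r.toNat % 8, List.mem_range.mpr (by omega), by omega⟩)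
    | exact pv_of_all pv_chunk25 (List.mem_map.mpr ⟨r.toNat % 8, List.mem_range.mpr (by omega), by omega⟩)
    | exact pv_of_all pv_chunk26 (List.mem_map.mpr ⟨r.toNat % 8, List.mem_range.mpr (by omega), by omega⟩)
    | exact pv_of_all pv_chunk27 (List.mem_map.mpr ⟨r.toNat % 8, List.mem_range.mpr (by omega), by omega⟩)
    | exact pv_of_all pv_chunk28 (List.mem_map.mpr ⟨r.toNat % 8, List.mem_range.mpr (by omega), by omega⟩)
    | exact pv_of_all pv_chunk29 (List.mem_map.mpr ⟨r.toNat % 8, List.mem_range.mpr (by omega), by omega⟩)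
    | exact pv_of_all pv_chunk30 (List.mem_map.mpr ⟨r.toNat % 8, List.mem_range.mpr (by omega), by omega⟩)
    | exact pv_of_all pv_chunk31 (List.mem_map.mpr ⟨r.toNat % 8, List.mem_range.mpr (by omega), by omega⟩)

-- ===== VERDICT (by name: the statement is the Claim_ definition above) =====
theorem rm_encode_single_spec : Claim_equal_rm_encode_single := by
  intro m _
  unfold Spec_rm_encode_single
  rw [pvA_mod, pvB_mod]
  exact pv_all _ (Int.emod_nonneg m (by norm_num)) (Int.emod_lt_of_pos m (by norm_num))
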